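-- pv_equiv track=rewrite | github.com/foksly/feedback-learning | something-in-the-way/env/field.py | _compute_pattern_range
-- ===== SOURCE A (Python) =====
-- def _compute_pattern_range(pattern):
--     current_y = 0
--     upper_bound = 0
--     lower_bound = 0
--
--     for p in pattern:
--         if p.upper() == 'U':
--             current_y += 1
--             upper_bound = max(upper_bound, current_y)
--         elif p.upper() == 'D':
--             current_y -= 1
--             lower_bound = min(lower_bound, current_y)
--     return -lower_bound, upper_bound
-- ===== SOURCE B (Python) =====
-- def _compute_pattern_range(pattern):
--     # Divide and conquer: each segment is summarized by (net sum, highest prefix, lowest prefix);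
--     # summaries of two halves combine in O(1): high = max(h1, s1 + h2), low = min(l1, s1 + l2).
--     def go(i, j):
--         if j - i == 0:
--             return (0, 0, 0)
--         if j - i == 1:
--             c = pattern[i]
--             s = 1 if c in 'Uu' else -1 if c in 'Dd' else 0
--             return (s, max(0, s), min(0, s))
--         m = (i + j) // 2
--         s1, h1, l1 = go(i, m)
--         s2, h2, l2 = go(m, j)
--         return (s1 + s2, max(h1, s1 + h2), min(l1, s1 + l2))
--     _, high, low = go(0, len(pattern))
--     return (-low, high)
-- ===== Notes on version B (the rewrite author's own statement) =====
-- stated objective: alternative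
-- what changed: Replaces A's left-to-right three-variable scan with a divide-and-conquer recursion: each half is summarized as (net sum, highest prefix, lowest prefix) and the two summaries are combined in O(1).
import Mathlib
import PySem

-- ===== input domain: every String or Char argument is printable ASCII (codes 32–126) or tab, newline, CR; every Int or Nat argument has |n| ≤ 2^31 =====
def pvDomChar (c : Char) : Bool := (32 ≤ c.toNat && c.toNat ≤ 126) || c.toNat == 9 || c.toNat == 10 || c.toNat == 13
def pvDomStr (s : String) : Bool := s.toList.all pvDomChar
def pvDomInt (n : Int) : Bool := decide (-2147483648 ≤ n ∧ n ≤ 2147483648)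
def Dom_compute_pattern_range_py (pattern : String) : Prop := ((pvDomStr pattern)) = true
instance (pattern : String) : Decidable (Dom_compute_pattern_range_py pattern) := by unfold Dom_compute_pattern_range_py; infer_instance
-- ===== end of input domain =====

-- B replaces A's left-to-right three-variable scan by a divide-and-conquer recursion that
-- summarizes each half as (net sum, highest prefix, lowest prefix) and combines the two
-- summaries in O(1) (objective: alternative algorithm, same O(n) total cost).

-- ===== PORT A =====
-- A's loop body: state (current_y, upper_bound, lower_bound); p.upper() == 'U'/'D' is
-- PySem.Chars.upperChar (exact on the printable-ASCII domain, where a 1-char str.upper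
-- is the ASCII char uppercasing).
def aStep (s : Int × Int × Int) (p : Char) : Int × Int × Int :=
  if PySem.Chars.upperChar p = 'U' then (s.1 + 1, max s.2.1 (s.1 + 1), s.2.2)
  else if PySem.Chars.upperChar p = 'D' then (s.1 - 1, s.2.1, min s.2.2 (s.1 - 1))
  else s

def compute_pattern_range_py (pattern : String) : Int × Int :=
  let r := pattern.toList.foldl aStep (0, 0, 0)
  (-r.2.2, r.2.1)

-- ===== PORT B =====
-- B's per-char step value: 1 if c in 'Uu' else -1 if c in 'Dd' else 0
def bStep (c : Char) : Int :=
  if c = 'U' || c = 'u' then 1 else if c = 'D' || c = 'd' then -1 else 0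

-- B's go(i, j) on pattern[i:j], ported on the corresponding sublist: a length-≤1 segment is a
-- base case, otherwise split at the midpoint (j - i) // 2 and combine the two summaries.
def bGo (cs : List Char) : Int × Int × Int :=
  if _h : cs.length ≤ 1 then
    match cs with
    | [] => (0, 0, 0)
    | c :: _ => (bStep c, max 0 (bStep c), min 0 (bStep c))
  else
    let m := cs.length / 2
    let L := bGo (cs.take m)
    let R := bGo (cs.drop m)
    (L.1 + R.1, max L.2.1 (L.1 + R.2.1), min L.2.2 (L.1 + R.2.2))
termination_by cs.length
decreasing_by
  · simp only [List.length_take]; omega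
  · simp only [List.length_drop]; omega

def compute_pattern_range_py_alt (pattern : String) : Int × Int :=
  let r := bGo pattern.toList
  (-r.2.2, r.2.1)

-- ===== PRECONDITION & SPEC =====
def Spec_compute_pattern_range_py (pattern : String) (out : Int × Int) : Prop := out = compute_pattern_range_py_alt pattern
instance (pattern : String) (out : Int × Int) : Decidable (Spec_compute_pattern_range_py pattern out) := by unfold Spec_compute_pattern_range_py; infer_instance

-- ===== CLAIM (what is proved, stated in full; the proofs are below) =====
def Claim_equal_compute_pattern_range_py : Prop := ∀ (pattern : String), Dom_compute_pattern_range_py pattern → Spec_compute_pattern_range_py pattern (compute_pattern_range_py pattern)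

-- ===== LEMMAS AND PROOFS =====

-- highest / lowest prefix sum of the step sequence (0 for the empty prefix included)
def hiOf : List Char → Int
  | [] => 0
  | c :: cs => max 0 (bStep c + hiOf cs)

def loOf : List Char → Int
  | [] => 0
  | c :: cs => min 0 (bStep c + loOf cs)

theorem hiOf_nonneg (cs : List Char) : 0 ≤ hiOf cs := by
  cases cs <;> simp [hiOf]

theorem loOf_nonpos (cs : List Char) : loOf cs ≤ 0 := by
  cases cs <;> simp [loOf]

theorem toNat_ofNat_small (n : Nat) (h : n < 55296) : (Char.ofNat n).toNat = n := by
  unfold Char.ofNat Char.ofNatAux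
  split
  · rfl
  · next hh => exact absurd (by omega : Nat.isValidChar n) hh

-- which branch of A a character takes, versus its B step value
theorem charCase (c : Char) :
    (PySem.Chars.upperChar c = 'U' ∧ bStep c = 1) ∨
    (PySem.Chars.upperChar c ≠ 'U' ∧ PySem.Chars.upperChar c = 'D' ∧ bStep c = -1) ∨
    (PySem.Chars.upperChar c ≠ 'U' ∧ PySem.Chars.upperChar c ≠ 'D' ∧ bStep c = 0) := by
  by_cases hU : c = 'U'; · subst hU; left; decide
  by_cases hu : c = 'u'; · subst hu; left; decide
  by_cases hD : c = 'D'; · subst hD; right; left; decide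
  by_cases hd : c = 'd'; · subst hd; right; left; decide
  right; right
  have hb : bStep c = 0 := by simp [bStep, hU, hu, hD, hd]
  have key : ∀ t : Char, t.toNat < 97 → PySem.Chars.upperChar c = t → c = t ∨ c.toNat = t.toNat + 32 := by
    intro t ht h
    unfold PySem.Chars.upperChar at h
    by_cases hl : PySem.Chars.islower c = true
    · right
      rw [if_pos hl] at h
      have hle : 97 ≤ c.toNat ∧ c.toNat ≤ 122 := by
        unfold PySem.Chars.islower at hl
        simp only [Bool.and_eq_true, decide_eq_true_eq] at hl
        obtain ⟨h1, h2⟩ := hl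
        rw [Char.le_def] at h1 h2
        exact ⟨h1, h2⟩
      have := congrArg Char.toNat h
      rw [toNat_ofNat_small _ (by omega)] at this
      omega
    · left; simpa [hl] using h
  refine ⟨?_, ?_, hb⟩
  · intro h
    rcases key 'U' (by decide) h with h' | h'
    · exact hU h'
    · exact hu (by rw [← Char.ofNat_toNat c, h']; decide)
  · intro h
    rcases key 'D' (by decide) h with h' | h'
    · exact hD h'
    · exact hd (by rw [← Char.ofNat_toNat c, h']; decide)

-- A's fold, characterized by the sum / highest / lowest prefix statistics
theorem foldA_eq (cs : List Char) : ∀ y up lo : Int, lo ≤ y → y ≤ up →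
    cs.foldl aStep (y, up, lo) =
      (y + (cs.map bStep).sum, max up (y + hiOf cs), min lo (y + loOf cs)) := by
  induction cs with
  | nil => intro y up lo h1 h2; simp [hiOf, loOf]; omega
  | cons c cs ih =>
    intro y up lo h1 h2
    have hpos := hiOf_nonneg cs
    have hneg := loOf_nonpos cs
    rcases charCase c with ⟨hA, hB⟩ | ⟨hA, hA2, hB⟩ | ⟨hA, hA2, hB⟩
    · have hstep : aStep (y, up, lo) c = (y + 1, max up (y + 1), lo) := by
        simp [aStep, hA]
      rw [List.foldl_cons, hstep, ih (y + 1) (max up (y + 1)) lo (by omega) (by omega)]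
      simp only [Prod.mk.injEq, List.map_cons, List.sum_cons, hiOf, loOf, hB]
      refine ⟨by omega, by omega, by omega⟩
    · have hstep : aStep (y, up, lo) c = (y - 1, up, min lo (y - 1)) := by
        simp [aStep, hA2]
      rw [List.foldl_cons, hstep, ih (y - 1) up (min lo (y - 1)) (by omega) (by omega)]
      simp only [Prod.mk.injEq, List.map_cons, List.sum_cons, hiOf, loOf, hB]
      refine ⟨by omega, by omega, by omega⟩
    · have hstep : aStep (y, up, lo) c = (y, up, lo) := by
        simp [aStep, hA, hA2]
      rw [List.foldl_cons, hstep, ih y up lo h1 h2]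
      simp only [Prod.mk.injEq, List.map_cons, List.sum_cons, hiOf, loOf, hB]
      refine ⟨by omega, by omega, by omega⟩

-- the summary statistics compose over concatenation
theorem hiOf_append (xs ys : List Char) :
    hiOf (xs ++ ys) = max (hiOf xs) ((xs.map bStep).sum + hiOf ys) := by
  induction xs with
  | nil => have := hiOf_nonneg ys; simp [hiOf]; omega
  | cons c xs ih =>
    simp only [List.cons_append, hiOf, ih, List.map_cons, List.sum_cons]
    omega

theorem loOf_append (xs ys : List Char) :
    loOf (xs ++ ys) = min (loOf xs) ((xs.map bStep).sum + loOf ys) := by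
  induction xs with
  | nil => have := loOf_nonpos ys; simp [loOf]; omega
  | cons c xs ih =>
    simp only [List.cons_append, loOf, ih, List.map_cons, List.sum_cons]
    omega

-- B's divide-and-conquer recursion computes exactly those statistics
theorem bGo_eq : ∀ (n : Nat) (cs : List Char), cs.length ≤ n →
    bGo cs = ((cs.map bStep).sum, hiOf cs, loOf cs) := by
  intro n
  induction n with
  | zero =>
    intro cs h
    have : cs = [] := List.eq_nil_of_length_eq_zero (by omega)
    subst this
    simp [bGo, hiOf, loOf]
  | succ n ih =>
    intro cs h
    rw [bGo]
    by_cases h1 : cs.length ≤ 1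
    · rw [dif_pos h1]
      match cs, h1 with
      | [], _ => simp [hiOf, loOf]
      | [c], _ => simp [hiOf, loOf]
    · rw [dif_neg h1]
      have hm1 : 1 ≤ cs.length / 2 := by omega
      have hm2 : cs.length / 2 < cs.length := by omega
      have hL := ih (cs.take (cs.length / 2)) (by simp [List.length_take]; omega)
      have hR := ih (cs.drop (cs.length / 2)) (by simp [List.length_drop]; omega)
      simp only [hL, hR]
      have hsplit : cs = cs.take (cs.length / 2) ++ cs.drop (cs.length / 2) :=
        (List.take_append_drop _ _).symm
      conv_rhs => rw [hsplit]
      simp only [List.map_append, List.sum_append, hiOf_append, loOf_append]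

-- ===== VERDICT (by name: the statement is the Claim_ definition above) =====
theorem compute_pattern_range_py_spec : Claim_equal_compute_pattern_range_py := by
  intro pattern _
  unfold Spec_compute_pattern_range_py compute_pattern_range_py compute_pattern_range_py_alt
  set cs := pattern.toList with hcs
  have hA := foldA_eq cs 0 0 0 (le_refl 0) (le_refl 0)
  have hB := bGo_eq cs.length cs (le_refl _)
  have hpos := hiOf_nonneg cs
  have hneg := loOf_nonpos cs
  simp only [hA, hB]
  rw [Prod.mk.injEq]
  constructor <;> omega
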